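-- pv_equiv track=rewrite | github.com/TankistcKz/Labs | СиАОД/4/4_4.py | modified_linear_search_stats
-- ===== SOURCE A (Python) =====
-- def modified_linear_search_stats(arr, target):
--     comparisons = 0
--     iterations = 0
--     pointer_shifts = 0
--
--     n = len(arr)
--     if n == 0:
--         return -1, 0, 0, 0
--
--     last = arr[-1]
--     arr[-1] = target
--     i = 0
--     while True:
--         iterations += 1
--         comparisons += 1
--         if arr[i] == target:
--             break
--         i += 1
--         pointer_shifts += 1
--
--     arr[-1] = last
--     if i < n - 1 or last == target:
--         return i, comparisons, iterations, pointer_shifts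
--     return -1, comparisons, iterations, pointer_shifts
-- ===== SOURCE B (Python) =====
-- def modified_linear_search_stats(arr, target):
--     n = len(arr)
--     if n == 0:
--         return -1, 0, 0, 0
--     if target in arr:
--         j = arr.index(target)
--         if j < n - 1:
--             return j, j + 1, j + 1, j
--     return (n - 1 if arr[-1] == target else -1, n, n, n - 1)
-- ===== Notes on version B (the rewrite author's own statement) =====
-- stated objective: simpler
-- what changed: Replaces the sentinel loop (which temporarily overwrites arr[-1]) with a library membership/index lookup plus closed-form counter arithmetic; B never mutates arr.
import Mathlib
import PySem

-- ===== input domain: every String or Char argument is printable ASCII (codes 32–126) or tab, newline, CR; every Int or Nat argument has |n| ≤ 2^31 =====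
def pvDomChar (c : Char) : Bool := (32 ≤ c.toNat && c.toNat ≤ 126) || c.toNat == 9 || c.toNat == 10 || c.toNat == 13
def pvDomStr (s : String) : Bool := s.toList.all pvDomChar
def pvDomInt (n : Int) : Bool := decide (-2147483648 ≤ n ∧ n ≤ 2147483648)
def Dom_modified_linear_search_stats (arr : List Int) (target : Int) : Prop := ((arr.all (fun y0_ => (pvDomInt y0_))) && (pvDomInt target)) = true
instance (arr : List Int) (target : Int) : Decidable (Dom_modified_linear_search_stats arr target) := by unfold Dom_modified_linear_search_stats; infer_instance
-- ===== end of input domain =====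

-- B replaces A's sentinel loop (which temporarily overwrites arr[-1]) by a library index lookup
-- plus closed-form counter arithmetic; B never mutates arr.  A's mutation of arr is restored
-- before returning, so the net side effect is none; the equivalence is about the return value.

-- ===== PORT A =====
-- the 'while True' sentinel scan of A, walking the (sentinel-modified) list:
-- state (i, comparisons, iterations, pointer_shifts)
def pvALoop (xs : List Int) (target : Int) (i c it s : Int) : Int × Int × Int × Int :=
  match xs with
  | [] => (i, c, it, s)  -- unreachable: the sentinel guarantees a hit before the list ends
  | x :: rest =>
      if x = target then (i, c + 1, it + 1, s)
      else pvALoop rest target (i + 1) (c + 1) (it + 1) (s + 1)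

def modified_linear_search_stats (arr : List Int) (target : Int) : Int × Int × Int × Int :=
  let n : Int := arr.length
  if n = 0 then (-1, 0, 0, 0)
  else
    match PySem.List.pyGet? arr (-1) with
    | none => (-1, 0, 0, 0)  -- unreachable: arr is nonempty here
    | some last =>
        -- arr[-1] = target  (the sentinel write)
        let arr' := arr.dropLast ++ [target]
        let r := pvALoop arr' target 0 0 0 0
        -- (arr[-1] = last restores the list; no effect on the returned value)
        if r.1 < n - 1 ∨ last = target then r
        else (-1, r.2.1, r.2.2.1, r.2.2.2)

-- ===== PORT B =====
def modified_linear_search_stats_alt (arr : List Int) (target : Int) : Int × Int × Int × Int :=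
  let n : Int := arr.length
  if n = 0 then (-1, 0, 0, 0)
  else
    match PySem.List.index? arr target with  -- 'target in arr' + 'arr.index(target)'
    | some j => if (j : Int) < n - 1 then ((j : Int), (j : Int) + 1, (j : Int) + 1, (j : Int))
                else ((if PySem.List.pyGet? arr (-1) = some target then n - 1 else -1), n, n, n - 1)
    | none => ((if PySem.List.pyGet? arr (-1) = some target then n - 1 else -1), n, n, n - 1)

-- ===== PRECONDITION & SPEC =====
def Spec_modified_linear_search_stats (arr : List Int) (target : Int) (out : Int × Int × Int × Int) : Prop := out = modified_linear_search_stats_alt arr target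
instance (arr : List Int) (target : Int) (out : Int × Int × Int × Int) : Decidable (Spec_modified_linear_search_stats arr target out) := by unfold Spec_modified_linear_search_stats; infer_instance

-- ===== CLAIM (what is proved, stated in full; the proofs are below) =====
def Claim_equal_modified_linear_search_stats : Prop := ∀ (arr : List Int) (target : Int), Dom_modified_linear_search_stats arr target → Spec_modified_linear_search_stats arr target (modified_linear_search_stats arr target)

-- ===== LEMMAS AND PROOFS =====

-- A's sentinel loop characterised by the first index of target in the prefix before the sentinel.
theorem pvALoop_char (ys : List Int) (target : Int) (i c it s : Int) :
    pvALoop (ys ++ [target]) target i c it s =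
      match PySem.List.index? ys target with
      | some j => (i + j, c + j + 1, it + j + 1, s + j)
      | none => (i + ys.length, c + ys.length + 1, it + ys.length + 1, s + ys.length) := by
  induction ys generalizing i c it s with
  | nil =>
    rw [show PySem.List.index? ([] : List Int) target = none from
      (PySem.List.index?_eq_none_iff _ _).mpr (by simp)]
    simp [pvALoop]
  | cons x rest ih =>
    by_cases hx : x = target
    · subst hx
      rw [PySem.List.index?_cons_self]
      simp [pvALoop]
    · rw [List.cons_append,
        show pvALoop (x :: (rest ++ [target])) target i c it s =
            pvALoop (rest ++ [target]) target (i+1) (c+1) (it+1) (s+1) by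
          simp [pvALoop, hx],
        ih, PySem.List.index?_cons_of_ne rest hx]
      cases h : PySem.List.index? rest target with
      | none => simp; ring_nf; simp
      | some j => simp; ring_nf; simp

theorem pv_main (arr : List Int) (target : Int) :
    modified_linear_search_stats arr target = modified_linear_search_stats_alt arr target := by
  rcases List.eq_nil_or_concat arr with rfl | ⟨ys, last, rfl⟩
  · simp [modified_linear_search_stats, modified_linear_search_stats_alt]
  · rw [List.concat_eq_append]
    have hdl : (ys ++ [last]).dropLast = ys := by simp
    have hlen : (((ys ++ [last]).length : Int)) = (ys.length : Int) + 1 := by simp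
    have hne : ¬ (((ys ++ [last]).length : Int) = 0) := by rw [hlen]; omega
    unfold modified_linear_search_stats modified_linear_search_stats_alt
    simp only [if_neg hne, PySem.List.pyGet?_neg_one_append_singleton, hdl]
    rw [pvALoop_char]
    by_cases hmem : target ∈ ys
    · rw [PySem.List.index?_append_of_mem [last] hmem]
      cases h : PySem.List.index? ys target with
      | none => exact absurd ((PySem.List.index?_eq_none_iff _ _).mp h) (by simp [hmem])
      | some j =>
        have hj : j < ys.length := by
          rcases PySem.List.getElem_of_index?_eq_some h with ⟨hk, _⟩; exact hk
        simp [hj]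
    · by_cases hlast : last = target
      · subst hlast
        rw [PySem.List.index?_append_singleton_self ys last hmem,
          (PySem.List.index?_eq_none_iff ys last).mpr hmem]
        have hge : ¬ ((ys.length : Int) < ((ys ++ [last]).length : Int) - 1) := by
          rw [hlen]; omega
        simp
      · rw [(PySem.List.index?_eq_none_iff ys target).mpr hmem,
          (PySem.List.index?_eq_none_iff (ys ++ [last]) target).mpr
            (by simp [hmem]; intro h; exact hlast h.symm)]
        simp [hlast]

-- ===== VERDICT (by name: the statement is the Claim_ definition above) =====
theorem modified_linear_search_stats_spec : Claim_equal_modified_linear_search_stats := by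
  intro arr target _
  unfold Spec_modified_linear_search_stats
  exact pv_main arr target
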